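-- pv_equiv track=rewrite | github.com/Mikaspe/3.GumsContour | main.py | get_contour
-- ===== SOURCE A (Python) =====
-- def get_contour(sides):
--     """Determing model contour from sides."""
--     # Side makes contour if appears only once in sides
--     sides_counter = {}
--     for side in sides:  # Counting how many times same side appears
--         sides_counter[side] = sides_counter.get(side, 0) + 1
--
--     sides_contour = []  # Sides that make model contour
--     for side in sides_counter:  # Choosing sides that appears once - model contour
--         if sides_counter[side] == 1:
--             sides_contour.append(side)
--
--     return sides_contour
-- ===== SOURCE B (Python) =====
-- def get_contour(sides):
--     """Determing model contour from sides."""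
--     # Single pass: keep an ordered running answer, retracting a side once it repeats.
--     seen = set()
--     contour = []
--     for side in sides:
--         if side in seen:
--             if side in contour:
--                 contour.remove(side)
--         else:
--             seen.add(side)
--             contour.append(side)
--     return contour
-- ===== Notes on version B (the rewrite author's own statement) =====
-- stated objective: alternative
-- what changed: Replaces A's two phases (build a full count dictionary, then filter its keys) by one incremental pass that appends a first-seen side to the answer and retracts it from the answer when it repeats, using only a seen-set and the answer list.
import Mathlib
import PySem

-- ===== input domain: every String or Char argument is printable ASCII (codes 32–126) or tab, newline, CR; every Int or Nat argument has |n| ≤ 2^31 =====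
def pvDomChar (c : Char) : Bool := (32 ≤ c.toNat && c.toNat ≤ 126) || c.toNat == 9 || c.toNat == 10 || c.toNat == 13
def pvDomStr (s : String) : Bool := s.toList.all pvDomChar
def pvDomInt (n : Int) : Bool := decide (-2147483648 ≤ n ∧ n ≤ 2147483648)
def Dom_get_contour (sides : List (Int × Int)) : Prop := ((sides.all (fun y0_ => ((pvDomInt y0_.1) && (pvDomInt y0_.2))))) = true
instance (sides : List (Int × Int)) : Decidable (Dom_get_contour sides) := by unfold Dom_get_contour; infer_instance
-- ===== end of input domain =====

-- B replaces A's count-then-filter two-phase scan by a single incremental pass that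
-- appends first-seen sides and retracts a side from the running answer when it repeats
-- (objective: alternative; same result, no speed claim).


-- ===== PORT A =====
-- 'sides_counter[side]' inside the key loop always finds the key, so 'getD side 0' is exact there.
def get_contour (sides : List (Int × Int)) : List (Int × Int) :=
  let sides_counter :=
    sides.foldl (fun d side => d.insert side (d.getD side 0 + 1))
      (PySem.Dict.empty : PySem.Dict (Int × Int) Int)
  sides_counter.keys.foldl
    (fun acc side => if sides_counter.getD side 0 == 1 then acc ++ [side] else acc) []

-- ===== PORT B =====
-- 'contour.remove(side)' is guarded by 'side in contour', so remove? is some there; getD is exact.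
def get_contour_alt (sides : List (Int × Int)) : List (Int × Int) :=
  (sides.foldl
    (fun st side =>
      if PySem.Set.contains st.1 side then
        (st.1, if st.2.contains side then (PySem.List.remove? st.2 side).getD st.2 else st.2)
      else
        (PySem.Set.add st.1 side, st.2 ++ [side]))
    ((PySem.Set.empty : PySem.Set (Int × Int)), ([] : List (Int × Int)))).2

-- ===== PRECONDITION & SPEC =====
def Spec_get_contour (sides : List (Int × Int)) (out : List (Int × Int)) : Prop := out = get_contour_alt sides
instance (sides : List (Int × Int)) (out : List (Int × Int)) : Decidable (Spec_get_contour sides out) := by unfold Spec_get_contour; infer_instance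

-- ===== CLAIM (what is proved, stated in full; the proofs are below) =====
def Claim_equal_get_contour : Prop := ∀ (sides : List (Int × Int)), Dom_get_contour sides → Spec_get_contour sides (get_contour sides)

-- ===== LEMMAS AND PROOFS =====

-- Removing x from a filtered nodup list = filtering with a predicate that is false at x.
theorem pv_filter_erase {α : Type} [BEq α] [LawfulBEq α] (x : α) (S : List α) (hnd : S.Nodup)
    (p q : α → Bool) (hq : ∀ k ∈ S, k ≠ x → q k = p k) (hqx : q x = false) (hpx : p x = true) :
    S.filter q = (S.filter p).erase x := by
  induction S with
  | nil => simp
  | cons a S ih =>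
    have hndS : S.Nodup := hnd.of_cons
    by_cases hax : a = x
    · subst hax
      have haS : a ∉ S := (List.nodup_cons.mp hnd).1
      simp only [List.filter_cons, hqx, hpx, if_true]
      rw [List.erase_cons_head]
      exact List.filter_congr (fun k hk => hq k (List.mem_cons_of_mem a hk)
        (fun h => haS (h ▸ hk)))
    · have hqa : q a = p a := hq a (List.mem_cons_self) hax
      have ih' := ih hndS (fun k hk hkx => hq k (List.mem_cons_of_mem a hk) hkx)
      by_cases hpa : p a = true
      · simp only [List.filter_cons, hqa, hpa, if_true]
        rw [List.erase_cons_tail (by simp [hax]), ih']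
      · have hpa' : p a = false := by simpa using hpa
        simp only [List.filter_cons, hqa, hpa', Bool.false_eq_true, if_false, ih']

-- B's loop invariant: after the whole pass, seen = set(l) and contour = unique-count sides in order.
theorem pv_alt_inv (l : List (Int × Int)) :
    l.foldl
      (fun st side =>
        if PySem.Set.contains st.1 side then
          (st.1, if st.2.contains side then (PySem.List.remove? st.2 side).getD st.2 else st.2)
        else
          (PySem.Set.add st.1 side, st.2 ++ [side]))
      ((PySem.Set.empty : PySem.Set (Int × Int)), ([] : List (Int × Int)))
    = (PySem.Set.ofList l, (PySem.Set.ofList l).filter (fun k => l.count k == 1)) := by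
  induction l using List.reverseRecOn with
  | nil => rfl
  | append_singleton l x ih =>
    rw [List.foldl_append, ih]
    simp only [List.foldl_cons, List.foldl_nil]
    have hnd : (PySem.Set.ofList l).Nodup := PySem.Set.nodup_ofList l
    have hofl : PySem.Set.ofList (l ++ [x]) = PySem.Set.add (PySem.Set.ofList l) x :=
      PySem.Set.ofList_append_singleton l x
    by_cases hx : x ∈ l
    · have hc : PySem.Set.contains (PySem.Set.ofList l) x = true :=
        (PySem.Set.contains_iff _ _).mpr ((PySem.Set.mem_ofList _ _).mpr hx)
      have hadd : PySem.Set.add (PySem.Set.ofList l) x = PySem.Set.ofList l :=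
        PySem.Set.add_of_mem ((PySem.Set.mem_ofList _ _).mpr hx)
      rw [hofl, hadd]
      simp only [hc, if_true]
      have hcnt : ∀ k, (l ++ [x]).count k = l.count k + (if k = x then 1 else 0) := by
        intro k
        rcases eq_or_ne k x with h | h
        · subst h; simp [List.count_append]
        · simp [List.count_append, h, Ne.symm h]
      by_cases h1 : l.count x = 1
      · -- x was in the running contour; it gets erased
        have hxin : x ∈ (PySem.Set.ofList l).filter (fun k => l.count k == 1) := by
          refine List.mem_filter.mpr ⟨(PySem.Set.mem_ofList _ _).mpr hx, by simp [h1]⟩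
        have hcontains : ((PySem.Set.ofList l).filter (fun k => l.count k == 1)).contains x = true := by
          simpa using hxin
        rw [hcontains]
        simp only [if_true]
        rw [PySem.List.remove?_eq_some_erase _ _ hxin]
        simp only [Option.getD_some]
        congr 1
        refine (pv_filter_erase x (PySem.Set.ofList l) hnd
          (fun k => l.count k == 1) (fun k => (l ++ [x]).count k == 1) ?_ ?_ ?_).symm
        · intro k _ hkx; simp [hcnt k, hkx]
        · simp [hcnt x, h1]
        · simp [h1]
      · -- x already repeated: not in the running contour, nothing changes
        have hxout : ((PySem.Set.ofList l).filter (fun k => l.count k == 1)).contains x = false := by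
          simp only [List.contains_eq_mem, decide_eq_false_iff_not, List.mem_filter]
          rintro ⟨-, hb⟩
          exact h1 (by simpa using hb)
        rw [hxout]
        simp only [Bool.false_eq_true, if_false]
        congr 1
        refine List.filter_congr ?_
        intro k hk
        by_cases hkx : k = x
        · subst hkx
          have : 1 ≤ l.count k := List.one_le_count_iff.mpr hx
          simp [hcnt k, h1]
          omega
        · simp [hcnt k, hkx]
    · have hc : PySem.Set.contains (PySem.Set.ofList l) x = false := by
        simp only [PySem.Set.contains_eq_listContains, List.contains_eq_mem, decide_eq_false_iff_not]
        exact fun h => hx ((PySem.Set.mem_ofList _ _).mp h)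
      rw [hc]
      simp only [Bool.false_eq_true, if_false]
      rw [hofl]
      have hadd : PySem.Set.add (PySem.Set.ofList l) x = PySem.Set.ofList l ++ [x] :=
        PySem.Set.add_of_not_mem (fun h => hx ((PySem.Set.mem_ofList _ _).mp h))
      rw [hadd]
      congr 1
      rw [List.filter_append]
      have h0 : l.count x = 0 := List.count_eq_zero.mpr hx
      have hxf : [x].filter (fun k => (l ++ [x]).count k == 1) = [x] := by
        simp [List.count_append, h0]
      rw [hxf]
      congr 1
      refine List.filter_congr ?_
      intro k hk
      have hkx : k ≠ x := fun h => hx (h ▸ (PySem.Set.mem_ofList _ _).mp hk)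
      simp [List.count_append, Ne.symm hkx]

-- A computes the same filtered first-occurrence list.
theorem pv_A_eq (sides : List (Int × Int)) :
    get_contour sides = (PySem.Set.ofList sides).filter (fun k => sides.count k == 1) := by
  simp only [get_contour, PySem.List.foldl_append_if_eq_filter, List.nil_append]
  rw [PySem.Dict.foldl_insert_getD_add_one_eq_counter, PySem.Dict.keys_counter]
  refine List.filter_congr ?_
  intro k _
  rw [PySem.Dict.getD_counter]
  simp [beq_eq_beq, Nat.cast_eq_one]

-- ===== VERDICT (by name: the statement is the Claim_ definition above) =====
theorem get_contour_spec : Claim_equal_get_contour := by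
  intro sides _
  unfold Spec_get_contour get_contour_alt
  rw [pv_alt_inv, pv_A_eq]
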